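-- pv_equiv track=rewrite | github.com/SmartSparkCoding/hackanomoly-bot | nephthys/views/home/user_profiles.py | _fallback_user_ticket_profile
-- ===== SOURCE A (Python) =====
-- def _fallback_user_ticket_profile(descriptions: list[str]) -> str:
--     combined = " ".join(descriptions).lower()
--     keywords = {
--         "shipping": ["ship", "shipping", "cert", "certificate", "delivery"],
--         "identity": ["identity", "verify", "verification", "kyc"],
--         "fraud": ["fraud", "scam", "suspicious", "chargeback"],
--         "ai": ["ai", "model", "prompt", "response"],
--         "account": ["account", "login", "password", "access"],
--     }
--     counts = {
--         label: sum(combined.count(token) for token in tokens)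
--         for label, tokens in keywords.items()
--     }
--     top = sorted(counts.items(), key=lambda item: item[1], reverse=True)[0][0]
--     if counts[top] == 0:
--         return "Usually opens support tickets across mixed topics and follows up when needed."
--     if top == "shipping":
--         return "Usually opens tickets about shipping or certification progress and queue status."
--     if top == "identity":
--         return "Usually opens tickets related to identity verification or account checks."
--     if top == "fraud":
--         return "Usually opens tickets related to suspicious activity and fraud concerns."
--     if top == "ai":
--         return "Usually opens tickets about AI behavior, responses, or prompt-related issues."
--     return "Usually opens tickets related to account access and support setup issues."
-- ===== SOURCE B (Python) =====
-- def _fallback_user_ticket_profile(descriptions: list[str]) -> str: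
--     combined = " ".join(descriptions).lower()
--     table = [
--         (["ship", "shipping", "cert", "certificate", "delivery"],
--          "Usually opens tickets about shipping or certification progress and queue status."),
--         (["identity", "verify", "verification", "kyc"],
--          "Usually opens tickets related to identity verification or account checks."),
--         (["fraud", "scam", "suspicious", "chargeback"],
--          "Usually opens tickets related to suspicious activity and fraud concerns."),
--         (["ai", "model", "prompt", "response"],
--          "Usually opens tickets about AI behavior, responses, or prompt-related issues."),
--         (["account", "login", "password", "access"],
--          "Usually opens tickets related to account access and support setup issues."),
--     ]
--     best_msg = None
--     best_count = 0
--     for tokens, msg in table: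
--         count = sum(combined.count(token) for token in tokens)
--         if count > best_count:
--             best_count = count
--             best_msg = msg
--     if best_msg is None:
--         return "Usually opens support tickets across mixed topics and follows up when needed."
--     return best_msg
-- ===== Notes on version B (the rewrite author's own statement) =====
-- stated objective: simpler
-- what changed: Replaces the counts dict + stable reverse sort + label if-chain by a single argmax scan over a token/message table with a strict '>' update (first entry wins ties) and a zero-count fallthrough.
import Mathlib
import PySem

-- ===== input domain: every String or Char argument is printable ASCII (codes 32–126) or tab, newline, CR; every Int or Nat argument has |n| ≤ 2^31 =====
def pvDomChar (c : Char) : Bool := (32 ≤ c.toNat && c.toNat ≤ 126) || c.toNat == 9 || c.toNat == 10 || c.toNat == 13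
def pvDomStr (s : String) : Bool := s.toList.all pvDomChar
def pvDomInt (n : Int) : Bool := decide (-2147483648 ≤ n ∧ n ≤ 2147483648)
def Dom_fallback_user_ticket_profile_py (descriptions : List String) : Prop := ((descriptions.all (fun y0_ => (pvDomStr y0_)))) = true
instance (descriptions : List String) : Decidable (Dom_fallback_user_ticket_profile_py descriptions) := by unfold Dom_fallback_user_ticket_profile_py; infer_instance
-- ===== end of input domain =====

-- B replaces A's counts-dict + stable reverse sort + label if-chain by one argmax scan over a
-- token/message table with a strict '>' update (first label wins ties, zero count falls through).

-- ===== PORT A =====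
def fallback_user_ticket_profile_py (descriptions : List String) : String :=
  let combined := PySem.Str.lower (PySem.Str.join " " descriptions)
  let keywords : PySem.Dict String (List String) := PySem.Dict.ofList [
    ("shipping", ["ship", "shipping", "cert", "certificate", "delivery"]),
    ("identity", ["identity", "verify", "verification", "kyc"]),
    ("fraud", ["fraud", "scam", "suspicious", "chargeback"]),
    ("ai", ["ai", "model", "prompt", "response"]),
    ("account", ["account", "login", "password", "access"])]
  let counts : PySem.Dict String Int :=
    PySem.Dict.ofList (keywords.items.map (fun lt =>
      (lt.1, (lt.2.map (fun token => ((PySem.Str.count combined token : Nat) : Int))).sum)))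
  -- sorted(counts.items(), key=…, reverse=True)[0][0]; counts has 5 entries so [0] cannot raise
  let top := (PySem.List.pyGetD (PySem.List.sorted counts.items (fun item => item.2) true) 0 ("", 0)).1
  if PySem.Dict.getD counts top 0 = 0 then
    "Usually opens support tickets across mixed topics and follows up when needed."
  else if top = "shipping" then
    "Usually opens tickets about shipping or certification progress and queue status."
  else if top = "identity" then
    "Usually opens tickets related to identity verification or account checks."
  else if top = "fraud" then
    "Usually opens tickets related to suspicious activity and fraud concerns."
  else if top = "ai" then
    "Usually opens tickets about AI behavior, responses, or prompt-related issues."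
  else
    "Usually opens tickets related to account access and support setup issues."

-- ===== PORT B =====
def fallback_user_ticket_profile_py_alt (descriptions : List String) : String :=
  let combined := PySem.Str.lower (PySem.Str.join " " descriptions)
  let table : List (List String × String) := [
    (["ship", "shipping", "cert", "certificate", "delivery"],
     "Usually opens tickets about shipping or certification progress and queue status."),
    (["identity", "verify", "verification", "kyc"],
     "Usually opens tickets related to identity verification or account checks."),
    (["fraud", "scam", "suspicious", "chargeback"],
     "Usually opens tickets related to suspicious activity and fraud concerns."),
    (["ai", "model", "prompt", "response"],
     "Usually opens tickets about AI behavior, responses, or prompt-related issues."),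
    (["account", "login", "password", "access"],
     "Usually opens tickets related to account access and support setup issues.")]
  let best := table.foldl (fun (acc : Option String × Int) row =>
      let count : Int := (row.1.map (fun token => ((PySem.Str.count combined token : Nat) : Int))).sum
      if acc.2 < count then (some row.2, count) else acc) (none, 0)
  match best.1 with
  | none => "Usually opens support tickets across mixed topics and follows up when needed."
  | some msg => msg

-- ===== PRECONDITION & SPEC =====
def Spec_fallback_user_ticket_profile_py (descriptions : List String) (out : String) : Prop := out = fallback_user_ticket_profile_py_alt descriptions
instance (descriptions : List String) (out : String) : Decidable (Spec_fallback_user_ticket_profile_py descriptions out) := by unfold Spec_fallback_user_ticket_profile_py; infer_instance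

-- ===== CLAIM (what is proved, stated in full; the proofs are below) =====
def Claim_equal_fallback_user_ticket_profile_py : Prop := ∀ (descriptions : List String), Dom_fallback_user_ticket_profile_py descriptions → Spec_fallback_user_ticket_profile_py descriptions (fallback_user_ticket_profile_py descriptions)

-- ===== LEMMAS AND PROOFS =====

-- count-sum of one token list over the combined description text (shared subexpression of both ports)
def pvCnt (ds : List String) (toks : List String) : Int :=
  (toks.map (fun token => ((PySem.Str.count (PySem.Str.lower (PySem.Str.join " " ds)) token : Nat) : Int))).sum

lemma pv_cnt_nonneg (ds toks : List String) : 0 ≤ pvCnt ds toks := by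
  unfold pvCnt
  apply List.sum_nonneg
  intro x hx
  rcases List.mem_map.1 hx with ⟨t, _, rfl⟩
  exact Int.natCast_nonneg _

-- A's tail computation once the five counts are known (keys literal, counts symbolic)
def pvAcore (c1 c2 c3 c4 c5 : Int) : String :=
  let counts : PySem.Dict String Int :=
    PySem.Dict.ofList [("shipping", c1), ("identity", c2), ("fraud", c3), ("ai", c4), ("account", c5)]
  let top := (PySem.List.pyGetD (PySem.List.sorted counts.items (fun item => item.2) true) 0 ("", 0)).1
  if PySem.Dict.getD counts top 0 = 0 then
    "Usually opens support tickets across mixed topics and follows up when needed."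
  else if top = "shipping" then
    "Usually opens tickets about shipping or certification progress and queue status."
  else if top = "identity" then
    "Usually opens tickets related to identity verification or account checks."
  else if top = "fraud" then
    "Usually opens tickets related to suspicious activity and fraud concerns."
  else if top = "ai" then
    "Usually opens tickets about AI behavior, responses, or prompt-related issues."
  else
    "Usually opens tickets related to account access and support setup issues."

-- B's tail computation once the five counts are known
def pvBcore (c1 c2 c3 c4 c5 : Int) : String :=
  let step := fun (acc : Option String × Int) (row : Int × String) =>
    if acc.2 < row.1 then (some row.2, row.1) else acc
  let best := [(c1, "Usually opens tickets about shipping or certification progress and queue status."),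
    (c2, "Usually opens tickets related to identity verification or account checks."),
    (c3, "Usually opens tickets related to suspicious activity and fraud concerns."),
    (c4, "Usually opens tickets about AI behavior, responses, or prompt-related issues."),
    (c5, "Usually opens tickets related to account access and support setup issues.")].foldl step (none, 0)
  match best.1 with
  | none => "Usually opens support tickets across mixed topics and follows up when needed."
  | some msg => msg

-- head of one reverse-stable insertion = strict-max update of the old head
def pvStep (best : Option (String × Int)) (x : String × Int) : Option (String × Int) :=
  match best with
  | none => some x
  | some b => if b.2 < x.2 then some x else some b

lemma pv_insertBy_head (x : String × Int) (acc : List (String × Int)) :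
    (PySem.List.insertBy (fun a b => decide (b.2 < a.2)) x acc).head? = pvStep acc.head? x := by
  cases acc with
  | nil => simp [PySem.List.insertBy, pvStep]
  | cons h t =>
    simp only [PySem.List.insertBy, pvStep, List.head?]
    split_ifs <;> simp_all

lemma pv_pyGetD_zero_head (l : List (String × Int)) (d : String × Int) :
    PySem.List.pyGetD l 0 d = l.head?.getD d := by
  cases l <;> simp [PySem.List.pyGetD, PySem.List.pyIdx?, PySem.List.pyGet?]

set_option maxHeartbeats 4000000 in
lemma pv_core_eq (c1 c2 c3 c4 c5 : Int) (h1 : 0 ≤ c1) (h2 : 0 ≤ c2) (h3 : 0 ≤ c3)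
    (h4 : 0 ≤ c4) (h5 : 0 ≤ c5) : pvAcore c1 c2 c3 c4 c5 = pvBcore c1 c2 c3 c4 c5 := by
  unfold pvAcore pvBcore
  simp [PySem.List.sorted_rev_eq_foldl_insertBy, PySem.Dict.ofList, PySem.Dict.update,
    PySem.Dict.insert, PySem.Dict.empty, PySem.Dict.contains,
    pv_pyGetD_zero_head, pv_insertBy_head, pvStep, PySem.Dict.getD, PySem.Dict.get?,
    ← apply_ite (some : String × Int → Option (String × Int))]
  repeat' (split_ifs at * <;> simp_all)
  all_goals omega

lemma pv_portA_eq (ds : List String) : fallback_user_ticket_profile_py ds = pvAcore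
    (pvCnt ds ["ship", "shipping", "cert", "certificate", "delivery"])
    (pvCnt ds ["identity", "verify", "verification", "kyc"])
    (pvCnt ds ["fraud", "scam", "suspicious", "chargeback"])
    (pvCnt ds ["ai", "model", "prompt", "response"])
    (pvCnt ds ["account", "login", "password", "access"]) := rfl

lemma pv_portB_eq (ds : List String) : fallback_user_ticket_profile_py_alt ds = pvBcore
    (pvCnt ds ["ship", "shipping", "cert", "certificate", "delivery"])
    (pvCnt ds ["identity", "verify", "verification", "kyc"])
    (pvCnt ds ["fraud", "scam", "suspicious", "chargeback"])
    (pvCnt ds ["ai", "model", "prompt", "response"])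
    (pvCnt ds ["account", "login", "password", "access"]) := by
  unfold fallback_user_ticket_profile_py_alt pvBcore pvCnt
  simp only [List.foldl, List.map]

-- ===== VERDICT (by name: the statement is the Claim_ definition above) =====
theorem fallback_user_ticket_profile_py_spec : Claim_equal_fallback_user_ticket_profile_py := by
  intro ds _
  unfold Spec_fallback_user_ticket_profile_py
  rw [pv_portA_eq, pv_portB_eq]
  exact pv_core_eq _ _ _ _ _ (pv_cnt_nonneg ds _) (pv_cnt_nonneg ds _) (pv_cnt_nonneg ds _)
    (pv_cnt_nonneg ds _) (pv_cnt_nonneg ds _)
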